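-- pv_equiv track=rewrite | github.com/VishalHaswani/Password-Managment-System-using-AES256 | hexAndString.py | hex2string
-- ===== SOURCE A (Python) =====
-- hexa={'0':"0000",'1':"0001",'2':"0010",'3':"0011",'4':"0100",'5':"0101",'6':"0110",'7':"0111",
--    '8':"1000",'9':"1001",'a':"1010",'b':"1011",'c':"1100",'d':"1101",'e':"1110",'f':"1111" }
--
-- def hex2string(he):
--     temp = int("0x" + he[-1],16)
--     he="".join(he[:-1])
--     if(temp != 0): he = he[: (-1 * temp)]
--     he=[hexa[he[i]] for i in range(len(he))]
--     he="".join(he)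
--     string=[]
--     for i in range(0,len(he),8):
--         string.append(chr(int("0b"+he[i:i+8],2)))
--     string="".join(string)
--     return string
-- ===== SOURCE B (Python) =====
-- def hex2string(he):
--     temp = int("0x" + he[-1], 16)
--     he = he[:-1]
--     if temp != 0:
--         he = he[:(-1 * temp)]
--     out = []
--     for i in range(0, len(he), 2):
--         hi = int(he[i], 16)
--         if i + 1 < len(he):
--             out.append(chr(hi * 16 + int(he[i + 1], 16)))
--         else:
--             out.append(chr(hi))
--     return "".join(out)
-- ===== Notes on version B (the rewrite author's own statement) =====
-- stated objective: alternative
-- what changed: B decodes hex-digit pairs in one pass, computing each byte arithmetically as hi*16+lo (lone trailing nibble handled directly), instead of A's building of a joined 4-bit-per-digit binary string that is then re-chunked into 8-bit slices and parsed with int(.,2).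
import Mathlib
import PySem

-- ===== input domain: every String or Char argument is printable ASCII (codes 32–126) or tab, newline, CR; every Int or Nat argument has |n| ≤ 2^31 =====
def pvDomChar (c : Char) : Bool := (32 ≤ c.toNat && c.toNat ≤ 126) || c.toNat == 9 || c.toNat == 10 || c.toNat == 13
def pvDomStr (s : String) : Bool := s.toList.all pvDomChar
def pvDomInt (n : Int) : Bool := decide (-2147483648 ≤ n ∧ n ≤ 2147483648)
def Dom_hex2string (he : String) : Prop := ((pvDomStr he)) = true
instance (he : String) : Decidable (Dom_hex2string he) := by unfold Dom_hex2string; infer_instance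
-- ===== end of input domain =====

-- B replaces A's intermediate binary string + 8-bit re-chunking by a single pass over hex-digit
-- pairs computing each byte arithmetically (hi*16+lo); same return value on Pre_ (alternative decomposition).

-- ===== PORT A =====
-- the module-level dict 'hexa'
def pvHexa : PySem.Dict Char String := PySem.Dict.ofList
  [('0',"0000"),('1',"0001"),('2',"0010"),('3',"0011"),('4',"0100"),('5',"0101"),
   ('6',"0110"),('7',"0111"),('8',"1000"),('9',"1001"),('a',"1010"),('b',"1011"),
   ('c',"1100"),('d',"1101"),('e',"1110"),('f',"1111")]

-- [hexa[he[i]] for i in range(len(he))]; none = KeyError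
def pvMapHexa : List Char → Option (List String)
  | [] => some []
  | c :: rest =>
    match pvHexa.get? c with
    | none => none
    | some s =>
      match pvMapHexa rest with
      | none => none
      | some t => some (s :: t)

-- for i in range(0, len(he), 8): string.append(chr(int("0b"+he[i:i+8], 2)))
-- he[i:i+8] is spelled out as an 8-element pattern so the recursion is structural;
-- the final (shorter) chunk is the catch-all case
def pvChunkLoop : List Char → List Char
  | [] => []
  | c1 :: c2 :: c3 :: c4 :: c5 :: c6 :: c7 :: c8 :: rest =>
    (match PySem.Int.ofCharsBase? ('0' :: 'b' :: [c1, c2, c3, c4, c5, c6, c7, c8]) 2 with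
     | some v => Char.ofNat v.toNat
     | none => Char.ofNat 0) :: pvChunkLoop rest
  | cs =>
    [match PySem.Int.ofCharsBase? ('0' :: 'b' :: cs) 2 with
     | some v => Char.ofNat v.toNat
     | none => Char.ofNat 0]

def hex2string (he : String) : String :=
  match PySem.List.pyGet? he.toList (-1) with
  | none => ""                                   -- IndexError on empty input
  | some lastc =>
    match PySem.Int.ofCharsBase? ['0', 'x', lastc] 16 with
    | none => ""                                 -- ValueError: last char not a hex digit
    | some temp =>
      let body := PySem.List.slice he.toList none (some (-1))          -- he = "".join(he[:-1])
      let body := if temp ≠ 0 then PySem.List.slice body none (some (-1 * temp)) else body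
      match pvMapHexa body with
      | none => ""                               -- KeyError: char not in hexa
      | some nibs => String.ofList (pvChunkLoop ((nibs.map String.toList).flatten))

-- ===== PORT B =====
-- for i in range(0, len(he), 2): byte from the pair (or lone nibble); none = ValueError
-- the loop body for a lone trailing nibble: chr(int(he[i],16))
def pvPairOne (c : Char) : Option (List Char) :=
  match PySem.Int.ofCharsBase? [c] 16 with
  | none => none
  | some hi => some [Char.ofNat hi.toNat]

-- the loop body for a full pair: chr(int(he[i],16)*16 + int(he[i+1],16)), prepended to the rest
def pvPairStepF (c1 c2 : Char) (r : Option (List Char)) : Option (List Char) :=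
  match PySem.Int.ofCharsBase? [c1] 16 with
  | none => none
  | some hi =>
    match PySem.Int.ofCharsBase? [c2] 16 with
    | none => none
    | some lo =>
      match r with
      | none => none
      | some t => some (Char.ofNat (hi * 16 + lo).toNat :: t)

def pvPairLoop : List Char → Option (List Char)
  | [] => some []
  | [c] => pvPairOne c
  | c1 :: c2 :: rest => pvPairStepF c1 c2 (pvPairLoop rest)

def hex2string_alt (he : String) : String :=
  match PySem.List.pyGet? he.toList (-1) with
  | none => ""                                   -- IndexError on empty input
  | some lastc =>
    match PySem.Int.ofCharsBase? ['0', 'x', lastc] 16 with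
    | none => ""                                 -- ValueError: last char not a hex digit
    | some temp =>
      let body := PySem.List.slice he.toList none (some (-1))
      let body := if temp ≠ 0 then PySem.List.slice body none (some (-1 * temp)) else body
      match pvPairLoop body with
      | none => ""                               -- ValueError: char not a hex digit
      | some cs => String.ofList cs

-- ===== PRECONDITION & SPEC =====
def pvHexAll : List Char := ['0','1','2','3','4','5','6','7','8','9','a','b','c','d','e','f','A','B','C','D','E','F']
def pvLowHex : List Char := ['0','1','2','3','4','5','6','7','8','9','a','b','c','d','e','f']

-- the number of trailing chars the padding digit removes
def pvPadCount (c : Char) : Nat :=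
  ((PySem.Int.ofCharsBase? ['0', 'x', c] 16).getD 0).toNat

-- the part of he the decoding loop actually reads
def pvBody (he : String) : List Char :=
  he.toList.dropLast.take (he.toList.dropLast.length - pvPadCount (he.toList.getLastD ' '))

-- Pre_ excludes exactly the inputs on which A raises: empty input (IndexError),
-- a non-hex last char (ValueError), or a non-lowercase-hex char in the decoded part (KeyError).
def Pre_hex2string (he : String) : Prop :=
  he.toList ≠ [] ∧ pvHexAll.contains (he.toList.getLastD ' ') = true ∧
    (pvBody he).all pvLowHex.contains = true
instance (he : String) : Decidable (Pre_hex2string he) := by unfold Pre_hex2string; infer_instance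

def pvWitness_hex2string : String := "416a0"

def Spec_hex2string (he : String) (out : String) : Prop := out = hex2string_alt he
instance (he : String) (out : String) : Decidable (Spec_hex2string he out) := by unfold Spec_hex2string; infer_instance

-- ===== CLAIM (what is proved, stated in full; the proofs are below) =====
def Claim_equal_hex2string : Prop := ∀ (he : String), Dom_hex2string he → Pre_hex2string he → Spec_hex2string he (hex2string he)

-- ===== LEMMAS AND PROOFS =====

lemma pvHexAllFact : ∀ c ∈ pvHexAll,
    PySem.Int.ofCharsBase? ['0', 'x', c] 16 = some ((pvPadCount c : Nat) : Int) := by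
  intro c hc; fin_cases hc <;> decide

lemma pvNibFact : ∀ c ∈ pvLowHex,
    (pvHexa.get? c).isSome = true ∧ ((pvHexa.get? c).getD "").toList.length = 4 ∧
    (PySem.Int.ofCharsBase? [c] 16).isSome = true := by
  intro c hc; fin_cases hc <;> decide

-- nibble string and byte value of a hex-digit pair (proof-side abbreviations)
def pvNibStr (c : Char) : String := (pvHexa.get? c).getD ""
def pvByte (c1 c2 : Char) : Char :=
  Char.ofNat ((PySem.Int.ofCharsBase? [c1] 16).getD 0 * 16
    + (PySem.Int.ofCharsBase? [c2] 16).getD 0).toNat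

lemma pvGetNib : ∀ c ∈ pvLowHex, pvHexa.get? c = some (pvNibStr c) := by
  intro c hc; fin_cases hc <;> rfl

lemma pvChunkStep : ∀ c1 ∈ pvLowHex, ∀ c2 ∈ pvLowHex, ∀ ys : List Char,
    pvChunkLoop ((pvNibStr c1).toList ++ ((pvNibStr c2).toList ++ ys))
      = pvByte c1 c2 :: pvChunkLoop ys := by
  intro c1 h1 c2 h2 ys
  fin_cases h1 <;> fin_cases h2 <;> rfl

lemma pvMain : ∀ bs : List Char, (∀ c ∈ bs, c ∈ pvLowHex) →
    ∃ nibs pcs, pvMapHexa bs = some nibs ∧ pvPairLoop bs = some pcs ∧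
      pvChunkLoop ((nibs.map String.toList).flatten) = pcs
  | [], _ => ⟨[], [], rfl, rfl, rfl⟩
  | [c], h => by
    have hc := h c (by simp)
    fin_cases hc <;> exact ⟨_, _, rfl, rfl, rfl⟩
  | c1 :: c2 :: rest, h => by
    have hc1 := h c1 (by simp)
    have hc2 := h c2 (by simp)
    obtain ⟨nibs, pcs, h1, h2, h3⟩ := pvMain rest (fun c hc => h c (by simp [hc]))
    obtain ⟨-, -, hv1⟩ := pvNibFact c1 hc1
    obtain ⟨-, -, hv2⟩ := pvNibFact c2 hc2
    obtain ⟨a1, ha1⟩ := Option.isSome_iff_exists.mp hv1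
    obtain ⟨a2, ha2⟩ := Option.isSome_iff_exists.mp hv2
    have ga1 : (PySem.Int.ofCharsBase? [c1] 16).getD 0 = a1 := by rw [ha1]; rfl
    have ga2 : (PySem.Int.ofCharsBase? [c2] 16).getD 0 = a2 := by rw [ha2]; rfl
    refine ⟨pvNibStr c1 :: pvNibStr c2 :: nibs, pvByte c1 c2 :: pcs, ?_, ?_, ?_⟩
    · simp [pvMapHexa, pvGetNib c1 hc1, pvGetNib c2 hc2, h1]
    · rw [pvPairLoop, pvPairStepF, ha1, ha2, h2]
      simp only [pvByte, ga1, ga2]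
    · simpa [pvChunkStep c1 hc1 c2 hc2] using congrArg (pvByte c1 c2 :: ·) h3

theorem hex2string_spec : Claim_equal_hex2string := by
  unfold Claim_equal_hex2string
  intro he _ hpre
  obtain ⟨hne, hlastB, hbodyB⟩ := hpre
  have hlast : he.toList.getLastD ' ' ∈ pvHexAll := by simpa using hlastB
  have hbody : ∀ c ∈ pvBody he, c ∈ pvLowHex := by simpa using hbodyB
  obtain ⟨x, hx⟩ := Option.isSome_iff_exists.mp (List.getLast?_isSome.mpr hne)
  have hxd : he.toList.getLastD ' ' = x := by
    rw [List.getLastD_eq_getLast?, hx]; rfl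
  rw [hxd] at hlast
  have hfact := pvHexAllFact x hlast
  have hBody : (if ((pvPadCount x : Nat) : Int) ≠ 0 then
        PySem.List.slice (PySem.List.slice he.toList none (some (-1))) none
          (some (-1 * ((pvPadCount x : Nat) : Int)))
      else PySem.List.slice he.toList none (some (-1))) = pvBody he := by
    rw [PySem.List.slice_to_neg_one]
    by_cases hz : pvPadCount x = 0
    · rw [if_neg (by simp [hz])]
      unfold pvBody
      rw [hxd, hz, Nat.sub_zero, List.take_length]
    · have h0 : 0 < pvPadCount x := Nat.pos_of_ne_zero hz
      have hcast : -1 * ((pvPadCount x : Nat) : Int) = -((pvPadCount x : Nat) : Int) := by ring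
      rw [if_pos (by exact_mod_cast hz), hcast,
        PySem.List.slice_to_neg_natCast (k := pvPadCount x) _ h0]
      unfold pvBody
      rw [hxd]
  obtain ⟨nibs, pcs, h1, h2, h3⟩ := pvMain (pvBody he) hbody
  unfold Spec_hex2string hex2string hex2string_alt
  rw [PySem.List.pyGet?_neg_one, hx]
  simp only [hfact, hBody, h1, h2, h3]
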